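-- pv_equiv track=rewrite | github.com/Se1f0/GUI-PFE-MASTER | segmentation.py | createNewCoords
-- ===== SOURCE A (Python) =====
-- def createNewCoords(coords,coords2,minx,maxx):
--     coords3=[]
--     for z in range(minx,maxx+1):
--         c1=None
--         for c in coords:
--             if(c[0]==z):
--                 c1=c
--                 break
--         c2=None
--         for c in coords2:
--             if(c[0]==z):
--                 c2=c
--                 break
--         if(c1!=None and c2!=None):
--             if(c1[3]>c2[3]):
--                 coords3.append(c1)
--             else:
--                 coords3.append(c2)
--         else:
--             if(c1!=None and c2==None):
--                 coords3.append(c1)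
--             if(c2!=None and c1==None):
--                 coords3.append(c2)
--     return coords3
-- ===== SOURCE B (Python) =====
-- def createNewCoords(coords, coords2, minx, maxx):
--     if minx > maxx:
--         return []
--     # last write wins over the reversed list = first occurrence in the original list
--     first1 = {}
--     for c in reversed(coords):
--         first1[c[0]] = c
--     first2 = {}
--     for c in reversed(coords2):
--         first2[c[0]] = c
--     # iterate only the x values that actually occur, in increasing order
--     out = []
--     for x in sorted(x for x in first1.keys() | first2.keys() if minx <= x <= maxx):
--         c1 = first1.get(x)
--         c2 = first2.get(x)
--         if c1 is None:
--             out.append(c2)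
--         elif c2 is None:
--             out.append(c1)
--         else:
--             out.append(c1 if c1[3] > c2[3] else c2)
--     return out
-- ===== Notes on version B (the rewrite author's own statement) =====
-- stated objective: alternative
-- what changed: A loops over every z in [minx,maxx] and rescans both lists per z; B never iterates the range: it builds first-occurrence dicts by one reversed overwrite pass per list, then sorts the occurring in-range x values and emits the winner per key.
-- outside the precondition, e.g. on createNewCoords([[1, 2], []], [], 1, 1): A returns [[1, 2]], B raises IndexError
import Mathlib
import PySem

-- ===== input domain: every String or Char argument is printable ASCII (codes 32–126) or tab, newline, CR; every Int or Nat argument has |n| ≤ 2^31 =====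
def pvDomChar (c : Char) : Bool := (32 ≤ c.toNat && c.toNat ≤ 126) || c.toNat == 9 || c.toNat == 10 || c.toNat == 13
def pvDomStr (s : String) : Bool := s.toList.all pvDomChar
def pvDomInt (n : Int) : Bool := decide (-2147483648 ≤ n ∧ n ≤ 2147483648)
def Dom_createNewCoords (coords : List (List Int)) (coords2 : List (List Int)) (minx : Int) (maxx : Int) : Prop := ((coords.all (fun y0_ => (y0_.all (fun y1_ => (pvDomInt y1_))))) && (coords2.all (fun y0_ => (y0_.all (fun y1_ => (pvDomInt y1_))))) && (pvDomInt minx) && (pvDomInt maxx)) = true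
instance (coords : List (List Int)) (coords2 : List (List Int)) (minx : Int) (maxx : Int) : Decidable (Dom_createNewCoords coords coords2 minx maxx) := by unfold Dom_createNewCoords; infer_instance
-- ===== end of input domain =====

-- B never iterates the x-range: it builds first-occurrence dicts by one reversed overwrite
-- pass per list and walks the SORTED occurring in-range keys (objective: alternative).

-- ===== PORT A =====
-- For each z in range(minx, maxx+1), scan coords (then coords2) for the first row whose
-- head equals z (the inner for-with-break is List.find?); keep the higher row[3] of the two.
def createNewCoords (coords : List (List Int)) (coords2 : List (List Int)) (minx : Int) (maxx : Int) : List (List Int) :=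
  (PySem.List.pyRange minx (maxx + 1) 1).foldl (fun coords3 z =>
    let c1 := coords.find? (fun c => PySem.List.pyGet? c 0 == some z)
    let c2 := coords2.find? (fun c => PySem.List.pyGet? c 0 == some z)
    match c1, c2 with
    | some a, some b =>
        -- c1[3] > c2[3]; Pre_ guarantees index 3 exists, the getD 0 never fires inside Pre_
        if (PySem.List.pyGet? a 3).getD 0 > (PySem.List.pyGet? b 3).getD 0 then coords3 ++ [a]
        else coords3 ++ [b]
    | some a, none => coords3 ++ [a]
    | none, some b => coords3 ++ [b]
    | none, none => coords3) []

-- ===== PORT B =====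
-- Source B: for c in reversed(xs): d[c[0]] = c  — last write wins, so d holds FIRST occurrences;
-- Pre_ guarantees c ≠ [] whenever this is reached, so the getD 0 key fallback never fires
def pvFirstByX (xs : List (List Int)) : PySem.Dict Int (List Int) :=
  xs.reverse.foldl (fun d c => d.insert ((PySem.List.pyGet? c 0).getD 0) c) PySem.Dict.empty

def createNewCoords_alt (coords : List (List Int)) (coords2 : List (List Int)) (minx : Int) (maxx : Int) : List (List Int) :=
  if minx > maxx then []
  else
    let first1 := pvFirstByX coords
    let first2 := pvFirstByX coords2
    -- sorted(x for x in first1.keys() | first2.keys() if minx <= x <= maxx)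
    let xs := PySem.List.sorted
      ((PySem.Set.union (PySem.Set.ofList first1.keys) first2.keys).filter
        (fun x => decide (minx ≤ x ∧ x ≤ maxx))) (fun x => x) false
    xs.foldl (fun out x =>
      match first1.get? x, first2.get? x with
      | none, some c2 => out ++ [c2]
      | some c1, none => out ++ [c1]
      | some c1, some c2 =>
          if (PySem.List.pyGet? c1 3).getD 0 > (PySem.List.pyGet? c2 3).getD 0 then out ++ [c1]
          else out ++ [c2]
      | none, none => out) []

-- ===== PRECONDITION & SPEC =====
-- Pre_ excludes the inputs where A or B raises IndexError (when the range is nonempty: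
-- an empty row reached by a scan, or a matched pair read at index 3 on a row shorter than 4);
-- it is slightly narrower than A's exact domain: it demands length ≥ 4 of EVERY pair of rows
-- with equal in-range heads, while A reads index 3 only at the first occurrence, and demands
-- every row nonempty while A stops scanning at the first match — see the cites in the claim.
def Pre_createNewCoords (coords : List (List Int)) (coords2 : List (List Int)) (minx : Int) (maxx : Int) : Prop :=
  minx ≤ maxx →
    ((∀ c ∈ coords, c ≠ []) ∧ (∀ c ∈ coords2, c ≠ []) ∧
     (∀ c ∈ coords, ∀ c' ∈ coords2,
       (c.headD 0 = c'.headD 0 ∧ minx ≤ c.headD 0 ∧ c.headD 0 ≤ maxx) →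
       4 ≤ c.length ∧ 4 ≤ c'.length))
instance (coords : List (List Int)) (coords2 : List (List Int)) (minx : Int) (maxx : Int) : Decidable (Pre_createNewCoords coords coords2 minx maxx) := by unfold Pre_createNewCoords; infer_instance

def pvWitness_createNewCoords : List (List Int) × List (List Int) × Int × Int :=
  ([[1, 2, 3, 4], [0, 9, 9, 9]], [[1, 0, 0, 5]], 0, 2)

def Spec_createNewCoords (coords : List (List Int)) (coords2 : List (List Int)) (minx : Int) (maxx : Int) (out : List (List Int)) : Prop := out = createNewCoords_alt coords coords2 minx maxx
instance (coords : List (List Int)) (coords2 : List (List Int)) (minx : Int) (maxx : Int) (out : List (List Int)) : Decidable (Spec_createNewCoords coords coords2 minx maxx out) := by unfold Spec_createNewCoords; infer_instance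

-- ===== CLAIM (what is proved, stated in full; the proofs are below) =====
def Claim_equal_createNewCoords : Prop := ∀ (coords : List (List Int)) (coords2 : List (List Int)) (minx : Int) (maxx : Int), Dom_createNewCoords coords coords2 minx maxx → Pre_createNewCoords coords coords2 minx maxx → Spec_createNewCoords coords coords2 minx maxx (createNewCoords coords coords2 minx maxx)

-- ===== LEMMAS AND PROOFS =====

-- the shared per-key decision both programs make
def pvPick (coords coords2 : List (List Int)) (z : Int) : Option (List Int) :=
  match coords.find? (fun c => PySem.List.pyGet? c 0 == some z),
        coords2.find? (fun c => PySem.List.pyGet? c 0 == some z) with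
  | some a, some b =>
      if (PySem.List.pyGet? a 3).getD 0 > (PySem.List.pyGet? b 3).getD 0 then some a else some b
  | some a, none => some a
  | none, some b => some b
  | none, none => none

-- the last-write-wins dict over the reversed list looks up A's first-match scan
theorem pv_get_firstByX (xs : List (List Int)) (z : Int) (h : ∀ c ∈ xs, c ≠ []) :
    (pvFirstByX xs).get? z = xs.find? (fun c => PySem.List.pyGet? c 0 == some z) := by
  induction xs with
  | nil => rfl
  | cons c rest ih =>
    obtain ⟨a, t, rfl⟩ : ∃ a t, c = a :: t := by
      cases c with
      | nil => exact absurd rfl (h [] (List.mem_cons_self))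
      | cons a t => exact ⟨a, t, rfl⟩
    have hget0 : PySem.List.pyGet? (a :: t) 0 = some a := by
      simp [PySem.List.pyGet?, PySem.List.pyIdx?]
    unfold pvFirstByX
    rw [List.reverse_cons, List.foldl_append]
    simp only [List.foldl_cons, List.foldl_nil, hget0, Option.getD_some]
    rw [PySem.Dict.get?_insert]
    rw [show (rest.reverse.foldl (fun d c => d.insert ((PySem.List.pyGet? c 0).getD 0) c) PySem.Dict.empty) = pvFirstByX rest from rfl]
    rw [ih (fun c hc => h c (List.mem_cons_of_mem _ hc))]
    simp only [List.find?_cons, hget0]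
    by_cases hz : z = a
    · subst hz; simp
    · have : ((some a : Option Int) == some z) = false := by
        rw [beq_eq_false_iff_ne]; intro hc; exact hz (by injection hc with h0; omega)
      simp [hz, this]

-- a key is in the dict iff A's scan finds a row with that head
theorem pv_mem_keys_firstByX (xs : List (List Int)) (z : Int) (h : ∀ c ∈ xs, c ≠ []) :
    z ∈ (pvFirstByX xs).keys ↔ (xs.find? (fun c => PySem.List.pyGet? c 0 == some z)).isSome := by
  rw [← pv_get_firstByX xs z h]
  constructor
  · intro hm
    cases hg : (pvFirstByX xs).get? z with
    | some v => simp
    | none => exact absurd hm ((PySem.Dict.get?_eq_none_iff_not_mem_keys _ _).mp hg)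
  · intro hs
    by_contra hm
    rw [(PySem.Dict.get?_eq_none_iff_not_mem_keys _ _).mpr hm] at hs
    simp at hs

-- the append-per-match loop body is a filterMap
theorem pv_foldl_pick (f : Int → Option (List Int)) (l : List Int) (acc : List (List Int)) :
    l.foldl (fun acc z => match f z with | some v => acc ++ [v] | none => acc) acc
      = acc ++ l.filterMap f := by
  induction l generalizing acc with
  | nil => simp
  | cons x xs ih =>
    simp only [List.foldl_cons, List.filterMap_cons]
    cases hx : f x with
    | none => exact ih acc
    | some v => rw [ih (acc ++ [v])]; simp

-- dropping the elements where f is none does not change filterMap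
theorem pv_filterMap_filter (f : Int → Option (List Int)) (p : Int → Bool) (l : List Int)
    (h : ∀ z ∈ l, p z = false → f z = none) :
    l.filterMap f = (l.filter p).filterMap f := by
  induction l with
  | nil => rfl
  | cons x xs ih =>
    have ih' := ih (fun z hz => h z (List.mem_cons_of_mem _ hz))
    cases hp : p x with
    | true => simp [hp, List.filterMap_cons, ih']
    | false =>
      simp [hp, h x (List.mem_cons_self) hp, ih']

-- ===== VERDICT (by name: the statement is the Claim_ definition above) =====
theorem createNewCoords_spec : Claim_equal_createNewCoords := by
  intro coords coords2 minx maxx _ hpre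
  unfold Spec_createNewCoords createNewCoords createNewCoords_alt
  by_cases hle : minx ≤ maxx
  · obtain ⟨h1, h2, _⟩ := hpre hle
    rw [if_neg (by omega)]
    -- both folds are filterMap pvPick over their index list
    have hA : ∀ (l : List Int) (acc : List (List Int)),
        l.foldl (fun coords3 z =>
          let c1 := coords.find? (fun c => PySem.List.pyGet? c 0 == some z)
          let c2 := coords2.find? (fun c => PySem.List.pyGet? c 0 == some z)
          match c1, c2 with
          | some a, some b =>
              if (PySem.List.pyGet? a 3).getD 0 > (PySem.List.pyGet? b 3).getD 0 then coords3 ++ [a]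
              else coords3 ++ [b]
          | some a, none => coords3 ++ [a]
          | none, some b => coords3 ++ [b]
          | none, none => coords3) acc
        = acc ++ l.filterMap (pvPick coords coords2) := by
      intro l acc
      rw [← pv_foldl_pick (pvPick coords coords2) l acc]
      apply PySem.List.foldl_congr_mem
      intro acc z _
      unfold pvPick
      cases coords.find? (fun c => PySem.List.pyGet? c 0 == some z) <;>
        cases coords2.find? (fun c => PySem.List.pyGet? c 0 == some z) <;>
        simp <;> split <;> rfl
    have hB : ∀ (l : List Int) (acc : List (List Int)),
        l.foldl (fun out x =>
          match (pvFirstByX coords).get? x, (pvFirstByX coords2).get? x with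
          | none, some c2 => out ++ [c2]
          | some c1, none => out ++ [c1]
          | some c1, some c2 =>
              if (PySem.List.pyGet? c1 3).getD 0 > (PySem.List.pyGet? c2 3).getD 0 then out ++ [c1]
              else out ++ [c2]
          | none, none => out) acc
        = acc ++ l.filterMap (pvPick coords coords2) := by
      intro l acc
      rw [← pv_foldl_pick (pvPick coords coords2) l acc]
      apply PySem.List.foldl_congr_mem
      intro acc z _
      unfold pvPick
      rw [pv_get_firstByX coords z h1, pv_get_firstByX coords2 z h2]
      cases coords.find? (fun c => PySem.List.pyGet? c 0 == some z) <;>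
        cases coords2.find? (fun c => PySem.List.pyGet? c 0 == some z) <;>
        simp <;> split <;> rfl
    rw [hA, hB]
    -- it remains: filterMap over the range = filterMap over B's sorted key list
    simp only [List.nil_append]
    -- B's sorted key list is the range filtered to the occurring keys
    set u := PySem.Set.union (PySem.Set.ofList (pvFirstByX coords).keys) (pvFirstByX coords2).keys with hu
    have hnodup_u : u.Nodup := PySem.Set.nodup_union _ _ (PySem.Set.nodup_ofList _)
    have hmem_u : ∀ z : Int, z ∈ u ↔
        ((coords.find? (fun c => PySem.List.pyGet? c 0 == some z)).isSome ∨
         (coords2.find? (fun c => PySem.List.pyGet? c 0 == some z)).isSome) := by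
      intro z
      rw [hu, PySem.Set.mem_union, PySem.Set.mem_ofList,
        pv_mem_keys_firstByX coords z h1, pv_mem_keys_firstByX coords2 z h2]
    have hsorted : PySem.List.sorted (u.filter (fun x => decide (minx ≤ x ∧ x ≤ maxx))) (fun x => x) false
        = (PySem.List.pyRange minx (maxx + 1) 1).filter (fun z => decide (z ∈ u)) := by
      apply PySem.List.sorted_eq_of_perm_of_pairwise_lt
      · apply (List.perm_ext_iff_of_nodup (List.Nodup.filter _ (PySem.List.nodup_pyRange_one _ _)) (List.Nodup.filter _ hnodup_u)).mpr
        intro z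
        simp only [List.mem_filter, PySem.List.mem_pyRange_one, decide_eq_true_eq]
        constructor
        · rintro ⟨⟨hz1, hz2⟩, hz3⟩; exact ⟨hz3, hz1, by omega⟩
        · rintro ⟨hz3, hz1, hz2⟩; exact ⟨⟨hz1, by omega⟩, hz3⟩
      · exact List.Pairwise.filter _ (PySem.List.pairwise_lt_pyRange_one _ _)
    rw [hsorted]
    -- and pvPick is none off the occurring keys
    apply pv_filterMap_filter
    intro z _ hz
    unfold pvPick
    have := hmem_u z
    cases hf1 : coords.find? (fun c => PySem.List.pyGet? c 0 == some z) <;>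
      cases hf2 : coords2.find? (fun c => PySem.List.pyGet? c 0 == some z)
    · rfl
    all_goals (exfalso; rw [hf1, hf2] at this; simp at hz; exact hz (this.mpr (by simp)))
  · rw [if_pos (by omega), PySem.List.pyRange_one_eq_nil (by omega)]
    simp
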